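-- pv_equiv track=rewrite | github.com/Anna-Livia/kata_python | Kata_potter/kata_potter.py | order_generator
-- ===== SOURCE A (Python) =====
-- def order_generator(basket, max_bundle):
--     order = []
--     books = basket
--     for bundle_size in reversed(range(1, max_bundle + 1)):
--         bundles, remainder = bundle_finder(books, bundle_size)
--         order.insert(0, bundles)
--         books = remainder
--     return order
--
-- def bundle_finder(books, bundle_size):
--     number_of_bundle = 0
--     while len(books) >= bundle_size:
--         counter = 0
--         for tome in range(len(books)):
--             counter += 1
--             books[tome] -= 1
--             if counter == bundle_size:
--                 number_of_bundle += 1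
--                 books = [book for book in books if book > 0]
--                 break
--     return number_of_bundle, books
-- ===== SOURCE B (Python) =====
-- def order_generator(basket, max_bundle):
--     # Batched rounds: instead of removing one bundle at a time, subtract
--     # min(books[:k]) rounds at once per phase.  (Does not mutate basket,
--     # unlike the original, which decrements it in place.)
--     books = list(basket)
--     order = []
--     for k in range(max_bundle, 0, -1):
--         count = 0
--         while len(books) >= k:
--             r = max(1, min(books[:k]))
--             count += r
--             books = [b - r for b in books[:k] if b > r] + [b for b in books[k:] if b > 0]
--         order.append(count)
--     return order[::-1]
-- ===== Notes on version B (the rewrite author's own statement) =====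
-- stated objective: faster
-- what changed: Instead of removing one bundle per round (decrementing the first k counts by 1 and rescanning, total-count many times), B batches identical rounds: per phase it subtracts r = max(1, min(books[:k])) from the first k counts in one list pass, so each pass removes at least one title. A mutates basket in place; B does not (return values agree).
import Mathlib
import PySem

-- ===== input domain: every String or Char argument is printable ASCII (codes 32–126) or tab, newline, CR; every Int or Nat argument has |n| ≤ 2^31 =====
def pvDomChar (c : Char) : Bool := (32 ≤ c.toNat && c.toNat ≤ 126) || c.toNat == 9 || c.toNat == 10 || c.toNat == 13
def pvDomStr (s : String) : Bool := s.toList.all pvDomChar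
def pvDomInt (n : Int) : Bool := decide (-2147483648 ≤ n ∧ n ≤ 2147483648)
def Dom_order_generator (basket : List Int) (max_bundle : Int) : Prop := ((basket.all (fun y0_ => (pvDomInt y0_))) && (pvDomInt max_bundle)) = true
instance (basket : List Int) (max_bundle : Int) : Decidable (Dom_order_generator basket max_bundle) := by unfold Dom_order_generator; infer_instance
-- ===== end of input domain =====

-- B batches identical bundle-removal rounds (subtracting min(books[:k]) at once) instead of
-- A's one-round-at-a-time loop: asymptotically faster.  A mutates `basket` in place; B does
-- not; the equivalence proved here is about the RETURN value only.

-- ===== PORT A =====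

-- the `for tome in range(len(books))` loop of bundle_finder, walked structurally:
-- `pre` is the already-visited (decremented) prefix, `rest` the books from index `tome` on.
-- `some l` = the break fired and the filtered list is l; `none` = the for loop ran out.
def pvForLoop (pre rest : List Int) (bundle_size counter : Int) : Option (List Int) :=
  match rest with
  | [] => none
  | b :: bs =>
    let counter := counter + 1
    let b := b - 1
    if counter = bundle_size then
      some ((pre ++ b :: bs).filter (fun book => decide (book > 0)))
    else pvForLoop (pre ++ [b]) bs bundle_size counter

-- one while-iteration's effect on books (proved below to be what pvForLoop returns)
def pvStep (books : List Int) (k : Int) : List Int :=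
  ((books.take k.toNat).map (fun b => b - 1) ++ books.drop k.toNat).filter
    (fun book => decide (book > 0))

-- termination measure for A's while loop
def pvMu (l : List Int) : Nat := (l.map Int.toNat).sum + l.length

lemma pvForLoop_spec (rest : List Int) : ∀ (pre : List Int) (k c : Int), 0 ≤ c → c < k →
    k - c ≤ (rest.length : Int) →
    pvForLoop pre rest k c =
      some ((pre ++ ((rest.take (k - c).toNat).map (fun b => b - 1) ++ rest.drop (k - c).toNat)).filter
        (fun book => decide (book > 0))) := by
  induction rest with
  | nil => intro pre k c h0 h1 h2; simp at h2; omega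
  | cons b bs ih =>
    intro pre k c h0 h1 h2
    unfold pvForLoop
    by_cases hk : c + 1 = k
    · have : (k - c).toNat = 1 := by omega
      simp [hk, this]
    · have hlt : c + 1 < k := by omega
      have hnat : (k - c).toNat = (k - (c + 1)).toNat + 1 := by omega
      simp only [hk, if_false]
      rw [ih (pre ++ [b - 1]) k (c + 1) (by omega) hlt (by simp at h2 ⊢; omega)]
      congr 1
      rw [hnat]
      simp [List.take_succ_cons]

lemma pvMu_append (a b : List Int) : pvMu (a ++ b) = pvMu a + pvMu b := by
  simp [pvMu]; omega

lemma pvMu_filter_le (l : List Int) (p : Int → Bool) : pvMu (l.filter p) ≤ pvMu l := by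
  induction l with
  | nil => simp
  | cons x xs ih =>
    by_cases h : p x <;> simp [pvMu, h] at ih ⊢ <;> omega

lemma pvSumDec_le (xs : List Int) :
    (((xs.map (fun b => b - 1)).map Int.toNat).sum) ≤ ((xs.map Int.toNat).sum) := by
  induction xs with
  | nil => simp
  | cons y ys ih => simp at ih ⊢; omega

lemma pvMu_dec_lt (t : List Int) (ht : t ≠ []) :
    pvMu ((t.map (fun b => b - 1)).filter (fun book => decide (book > 0))) < pvMu t := by
  by_cases hw : ∃ b ∈ t, 1 ≤ b
  · have h1 : pvMu ((t.map (fun b => b - 1)).filter (fun book => decide (book > 0))) ≤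
        pvMu (t.map (fun b => b - 1)) := pvMu_filter_le _ _
    have h2 : pvMu (t.map (fun b => b - 1)) < pvMu t := by
      obtain ⟨w, hw1, hw2⟩ := hw
      clear h1 ht
      induction t with
      | nil => simp at hw1
      | cons x xs ih =>
        rw [List.mem_cons] at hw1
        rcases hw1 with rfl | hmem
        · have hle := pvSumDec_le xs
          simp [pvMu] at hle ⊢
          omega
        · have := ih hmem
          simp [pvMu] at this ⊢
          have hx : (x - 1).toNat ≤ x.toNat := by omega
          omega
    omega
  · simp only [not_exists, not_and, not_le] at hw
    have hnil : (t.map (fun b => b - 1)).filter (fun book => decide (book > 0)) = [] := by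
      rw [List.filter_eq_nil_iff]
      intro a ha
      simp only [List.mem_map] at ha
      obtain ⟨b, hb, rfl⟩ := ha
      have := hw b hb
      simp; omega
    rw [hnil]
    have : 1 ≤ t.length := by cases t <;> simp_all
    simp [pvMu]; omega

lemma pvMu_step_lt (books : List Int) (k : Int) (h1 : 1 ≤ k) (h2 : k ≤ (books.length : Int)) :
    pvMu (pvStep books k) < pvMu books := by
  have htake : books.take k.toNat ≠ [] := by
    apply List.ne_nil_of_length_pos
    simp; omega
  have hsplit : books = books.take k.toNat ++ books.drop k.toNat := by simp
  calc pvMu (pvStep books k)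
      = pvMu (((books.take k.toNat).map (fun b => b - 1)).filter (fun book => decide (book > 0)))
        + pvMu ((books.drop k.toNat).filter (fun book => decide (book > 0))) := by
        rw [pvStep, List.filter_append, pvMu_append]
    _ < pvMu (books.take k.toNat) + pvMu (books.drop k.toNat) := by
        have := pvMu_dec_lt (books.take k.toNat) htake
        have := pvMu_filter_le (books.drop k.toNat) (fun book => decide (book > 0))
        omega
    _ = pvMu books := by rw [← pvMu_append, ← hsplit]

-- termination of A's while loop, as one named lemma (cited by decreasing_by)
lemma pvBundleFinder_dec (books newBooks : List Int) (bundle_size : Int)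
    (h : 1 ≤ bundle_size ∧ bundle_size ≤ (books.length : Int))
    (hf : pvForLoop [] books bundle_size 0 = some newBooks) :
    pvMu newBooks < pvMu books := by
  have hspec := pvForLoop_spec books [] bundle_size 0 le_rfl (by omega) (by simpa using h.2)
  rw [hf] at hspec
  simp only [List.nil_append, Option.some.injEq] at hspec
  have : newBooks = pvStep books bundle_size := by rw [hspec, pvStep]; norm_num
  rw [this]
  exact pvMu_step_lt books bundle_size h.1 h.2

-- the `while len(books) >= bundle_size` loop of bundle_finder; the `1 ≤ bundle_size`
-- conjunct is a totality guard only (order_generator always calls with bundle_size ≥ 1;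
-- Python diverges for bundle_size ≤ 0).
def pvBundleFinder (books : List Int) (bundle_size : Int) : Int × List Int :=
  if h : 1 ≤ bundle_size ∧ bundle_size ≤ (books.length : Int) then
    match hf : pvForLoop [] books bundle_size 0 with
    | some newBooks =>
      let p := pvBundleFinder newBooks bundle_size
      (p.1 + 1, p.2)
    | none => (0, books)
  else (0, books)
termination_by pvMu books
decreasing_by
  exact pvBundleFinder_dec books newBooks bundle_size h hf

def order_generator (basket : List Int) (max_bundle : Int) : List Int :=
  -- for bundle_size in reversed(range(1, max_bundle + 1)); order.insert(0, bundles) prepends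
  (((PySem.List.pyRange 1 (max_bundle + 1) 1).reverse).foldl
    (fun (st : List Int × List Int) bundle_size =>
      let p := pvBundleFinder st.2 bundle_size
      (p.1 :: st.1, p.2)) ([], basket)).1

-- ===== PORT B =====

-- B's per-round list strictly shrinks (the minimal first-k element is dropped)
lemma pvBatchShrink (t d : List Int) (r m : Int) (hm : m ∈ t) (hmr : m ≤ r) :
    (((t.filter (fun b => decide (b > r))).map (fun b => b - r))
      ++ d.filter (fun b => decide (b > 0))).length < t.length + d.length := by
  have h1 : (t.filter (fun b => decide (b > r))).length < t.length :=
    List.length_filter_lt_length_iff_exists.mpr ⟨m, hm, by simp; omega⟩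
  have h2 := List.length_filter_le (fun b => decide (b > 0)) d
  simp only [List.length_append, List.length_map]
  omega

-- termination of B's while loop, as one named lemma (cited by decreasing_by)
lemma pvBatchLoop_dec (books : List Int) (k : Int) (h : 1 ≤ k ∧ k ≤ (books.length : Int)) :
    ((((PySem.List.slice books none (some k)).filter
        (fun b => decide (b > max 1 ((PySem.List.min? (PySem.List.slice books none (some k)) (fun x => x)).getD 0)))).map
        (fun b => b - max 1 ((PySem.List.min? (PySem.List.slice books none (some k)) (fun x => x)).getD 0)))
      ++ (PySem.List.slice books (some k) none).filter (fun b => decide (b > 0))).length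
      < books.length := by
  have hk0 : (0:Int) ≤ k := by omega
  simp only [PySem.List.slice_to books hk0, PySem.List.slice_from books hk0]
  have htake : books.take k.toNat ≠ [] := by
    apply List.ne_nil_of_length_pos
    simp; omega
  obtain ⟨m, hm⟩ := Option.ne_none_iff_exists'.mp
    (mt (PySem.List.min?_eq_none_iff (books.take k.toNat) (fun x => x)).mp htake)
  rw [hm]
  simp only [Option.getD_some]
  have hmmem := PySem.List.min?_mem hm
  have hlt := pvBatchShrink (books.take k.toNat) (books.drop k.toNat) (max 1 m) m hmmem
    (le_max_right 1 m)
  have hsplit : (books.take k.toNat).length + (books.drop k.toNat).length = books.length := by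
    simp; omega
  exact hsplit ▸ hlt

-- the `while len(books) >= k` loop of B; again `1 ≤ k` is a totality guard only
-- (B's range only produces k ≥ 1).
def pvBatchLoop (books : List Int) (k : Int) (count : Int) : Int × List Int :=
  if h : 1 ≤ k ∧ k ≤ (books.length : Int) then
    let firstk := PySem.List.slice books none (some k)          -- books[:k]
    let r := max 1 ((PySem.List.min? firstk (fun x => x)).getD 0)  -- min never none: firstk ≠ []
    let books' := (firstk.filter (fun b => decide (b > r))).map (fun b => b - r)
        ++ (PySem.List.slice books (some k) none).filter (fun b => decide (b > 0))
    pvBatchLoop books' k (count + r)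
  else (count, books)
termination_by books.length
decreasing_by
  exact pvBatchLoop_dec books k h

def order_generator_alt (basket : List Int) (max_bundle : Int) : List Int :=
  let books := basket
  -- for k in range(max_bundle, 0, -1): … ; order.append(count); return order[::-1]
  -- ([::-1] is List.reverse: PySem.List.slice?_none_none_neg_one)
  (((PySem.List.pyRange max_bundle 0 (-1)).foldl
    (fun (st : List Int × List Int) k =>
      let p := pvBatchLoop st.2 k 0
      (st.1 ++ [p.1], p.2)) ([], books)).1).reverse

-- ===== PRECONDITION & SPEC =====
def Spec_order_generator (basket : List Int) (max_bundle : Int) (out : List Int) : Prop := out = order_generator_alt basket max_bundle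
instance (basket : List Int) (max_bundle : Int) (out : List Int) : Decidable (Spec_order_generator basket max_bundle out) := by unfold Spec_order_generator; infer_instance

-- ===== CLAIM (what is proved, stated in full; the proofs are below) =====
def Claim_equal_order_generator : Prop := ∀ (basket : List Int) (max_bundle : Int), Dom_order_generator basket max_bundle → Spec_order_generator basket max_bundle (order_generator basket max_bundle)

-- ===== LEMMAS AND PROOFS =====

-- one batched round of B, as a function of the batch size j
def pvBatch (books : List Int) (k : Int) (j : Nat) : List Int :=
  ((books.take k.toNat).filter (fun b => decide (b > (j:Int)))).map (fun b => b - (j:Int))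
    ++ (books.drop k.toNat).filter (fun b => decide (b > 0))

lemma pvStep_eq_batch_one (books : List Int) (k : Int) :
    pvStep books k = pvBatch books k 1 := by
  rw [pvStep, pvBatch, List.filter_append, List.filter_map]
  have : List.filter ((fun book => decide (book > 0)) ∘ fun b => b - 1) (books.take k.toNat)
      = List.filter (fun b => decide (b > ((1:Nat):Int))) (books.take k.toNat) := by
    apply List.filter_congr
    intro b _
    simp only [Function.comp, decide_eq_decide]
    push_cast
    omega
  have hfun : (fun b : Int => b - 1) = (fun b : Int => b - ((1:Nat):Int)) := by
    funext b; push_cast; ring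
  rw [this, hfun]

-- unfolding A's while loop once under its guard
lemma pvBF_unfold (l : List Int) (k : Int) (h1 : 1 ≤ k) (h2 : k ≤ (l.length : Int)) :
    pvBundleFinder l k = ((pvBundleFinder (pvStep l k) k).1 + 1, (pvBundleFinder (pvStep l k) k).2) := by
  rw [pvBundleFinder]
  have h : 1 ≤ k ∧ k ≤ (l.length : Int) := ⟨h1, h2⟩
  rw [dif_pos h]
  have hspec := pvForLoop_spec l [] k 0 le_rfl (by omega) (by simpa using h2)
  simp only [List.nil_append] at hspec
  have hsome : pvForLoop [] l k 0 = some (pvStep l k) := by rw [hspec, pvStep]; norm_num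
  split
  · rename_i newBooks hf
    rw [hsome] at hf
    injection hf with hfe
    rw [hfe]
  · rename_i hf
    rw [hsome] at hf
    cases hf

-- decrementing by j then by 1 and filtering = one batched decrement by j+1
lemma pvShift (t : List Int) (j : Nat) :
    ((t.map (fun b => b - (j:Int))).map (fun b => b - 1)).filter (fun book => decide (book > 0))
      = (t.filter (fun b => decide (b > (((j+1 : Nat)) : Int)))).map (fun b => b - (((j+1 : Nat)) : Int)) := by
  rw [List.map_map, List.filter_map]
  trans (t.filter (fun b => decide (b > (((j+1 : Nat)) : Int)))).map
    ((fun b : Int => b - 1) ∘ (fun b : Int => b - (j:Int)))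
  · exact congrArg _ (List.filter_congr (by
      intro b _
      simp only [Function.comp, decide_eq_decide]
      push_cast
      omega))
  · exact List.map_congr_left (by intro b _; simp only [Function.comp]; push_cast; ring)

-- j batched rounds of size ≥ 1 equal j single rounds of A's loop
lemma pvBF_iter (k : Int) (hk : 1 ≤ k) : ∀ (j : Nat) (l : List Int), 1 ≤ j →
    k ≤ (l.length : Int) → (2 ≤ j → ∀ b ∈ l.take k.toNat, (j:Int) ≤ b) →
    pvBundleFinder l k =
      ((pvBundleFinder (pvBatch l k j) k).1 + (j:Int), (pvBundleFinder (pvBatch l k j) k).2) := by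
  intro j
  induction j with
  | zero => omega
  | succ j ih =>
    intro l _ hlen hmin
    by_cases hj : 1 ≤ j
    · -- first j rounds by IH, then one more
      have hminS : ∀ b ∈ l.take k.toNat, ((j:Int) + 1) ≤ b := by
        intro b hb; have := hmin (by omega) b hb; push_cast at this ⊢; omega
      have hmin' : 2 ≤ j → ∀ b ∈ l.take k.toNat, (j:Int) ≤ b := by
        intro _ b hb; have := hminS b hb; omega
      rw [ih l hj hlen hmin']
      -- on pvBatch l k j the first-k filter keeps everything
      have hfilter : (l.take k.toNat).filter (fun b => decide (b > (j:Int))) = l.take k.toNat := by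
        apply List.filter_eq_self.mpr
        intro b hb
        have := hminS b hb
        simp; push_cast at this ⊢; omega
      have hlen' : k ≤ ((pvBatch l k j).length : Int) := by
        simp only [pvBatch]; rw [hfilter]
        simp only [List.length_append, List.length_map]
        have : (l.take k.toNat).length = k.toNat := by simp; omega
        push_cast
        omega
      rw [pvBF_unfold (pvBatch l k j) k hk hlen']
      have hstep : pvStep (pvBatch l k j) k = pvBatch l k (j + 1) := by
        have hlentake : ((l.take k.toNat).filter (fun b => decide (b > (j:Int)))).length = k.toNat := by
          rw [hfilter]; simp; omega
        have hlenfm : (((l.take k.toNat).filter (fun b => decide (b > (j:Int)))).map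
            (fun b => b - (j:Int))).length = k.toNat := by
          rw [List.length_map, hlentake]
        have htake : (pvBatch l k j).take k.toNat
            = ((l.take k.toNat).filter (fun b => decide (b > (j:Int)))).map (fun b => b - (j:Int)) := by
          simp only [pvBatch]
          rw [List.take_append_of_le_length (le_of_eq hlenfm.symm)]
          exact List.take_of_length_le (le_of_eq hlenfm)
        have hdrop : (pvBatch l k j).drop k.toNat
            = (l.drop k.toNat).filter (fun b => decide (b > 0)) := by
          simp only [pvBatch]
          rw [List.drop_append_of_le_length (le_of_eq hlenfm.symm)]
          rw [List.drop_of_length_le (le_of_eq hlenfm)]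
          simp
        rw [pvStep, htake, hdrop]
        simp only [pvBatch]
        rw [List.filter_append]
        congr 1
        · rw [hfilter]
          exact pvShift (l.take k.toNat) j
        · simp [List.filter_filter]
      rw [hstep]
      simp only [Prod.mk.injEq, and_true]
      push_cast
      ring
    · -- j + 1 = 1 : single round
      have hj0 : j = 0 := by omega
      subst hj0
      rw [pvBF_unfold l k hk hlen, pvStep_eq_batch_one]
      norm_num

-- B's batch loop equals A's while loop (accumulator threaded)
lemma pvBatch_eq_BF (k : Int) : ∀ (books : List Int) (c : Int),
    pvBatchLoop books k c = (c + (pvBundleFinder books k).1, (pvBundleFinder books k).2) := by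
  intro books
  induction books using (measure List.length).wf.induction with
  | _ books IH =>
  intro c
  by_cases h : 1 ≤ k ∧ k ≤ (books.length : Int)
  · have hk0 : (0:Int) ≤ k := by omega
    have htake : books.take k.toNat ≠ [] := by
      apply List.ne_nil_of_length_pos
      simp; omega
    obtain ⟨m, hm⟩ := Option.ne_none_iff_exists'.mp
      (mt (PySem.List.min?_eq_none_iff (books.take k.toNat) (fun x => x)).mp htake)
    have hmmem := PySem.List.min?_mem hm
    have hmmin := PySem.List.min?_isMin hm
    -- unfold one batch iteration
    unfold pvBatchLoop
    rw [dif_pos h]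
    simp only [PySem.List.slice_to books hk0, PySem.List.slice_from books hk0, hm,
      Option.getD_some]
    set r : Int := max 1 m with hr
    have hbooks' : ((books.take k.toNat).filter (fun b => decide (b > r))).map (fun b => b - r)
        ++ (books.drop k.toNat).filter (fun b => decide (b > 0)) = pvBatch books k r.toNat := by
      simp only [pvBatch]
      have : ((r.toNat : Nat) : Int) = r := by omega
      rw [this]
    have hr1 : (1:Int) ≤ r := le_max_left 1 ((some m).getD 0)
    have hrm : m ≤ r := by rw [hr]; simp
    have hrc : ((r.toNat : Nat) : Int) = r := by omega
    have hlen' : (pvBatch books k r.toNat).length < books.length := by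
      simp only [pvBatch]
      have hlt := pvBatchShrink (books.take k.toNat) (books.drop k.toNat) ((r.toNat:Nat):Int) m
        hmmem (by omega)
      have hsplit : (books.take k.toNat).length + (books.drop k.toNat).length = books.length := by
        simp; omega
      exact hsplit ▸ hlt
    rw [hbooks']
    rw [IH (pvBatch books k r.toNat) hlen' (c + r)]
    -- A side: r.toNat rounds
    have hiter := pvBF_iter k h.1 r.toNat books (by omega) h.2 ?_
    · rw [hiter]
      have hc : ((r.toNat : Nat) : Int) = r := by omega
      rw [hc]
      simp only [Prod.mk.injEq, and_true]
      ring
    · intro h2 b hb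
      have := hmmin b hb
      simp only at this
      have hrm : r = m := by omega
      omega
  · unfold pvBatchLoop pvBundleFinder
    rw [dif_neg h, dif_neg h]
    simp

-- the two outer folds agree (A prepends, B appends then reverses)
lemma pvFold_eq (ks : List Int) : ∀ (books : List Int) (o : List Int),
    (ks.foldl (fun (st : List Int × List Int) bundle_size =>
        let p := pvBundleFinder st.2 bundle_size
        (p.1 :: st.1, p.2)) (o, books))
      = (((ks.foldl (fun (st : List Int × List Int) k =>
          let p := pvBatchLoop st.2 k 0
          (st.1 ++ [p.1], p.2)) (o.reverse, books)).1).reverse,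
        (ks.foldl (fun (st : List Int × List Int) k =>
          let p := pvBatchLoop st.2 k 0
          (st.1 ++ [p.1], p.2)) (o.reverse, books)).2) := by
  induction ks with
  | nil => intro books o; simp
  | cons k ks ih =>
    intro books o
    simp only [List.foldl_cons]
    rw [pvBatch_eq_BF k books 0]
    simp only [zero_add]
    have := ih (pvBundleFinder books k).2 ((pvBundleFinder books k).1 :: o)
    rw [List.reverse_cons] at this
    exact this

-- ===== VERDICT (by name: the statement is the Claim_ definition above) =====
theorem order_generator_spec : Claim_equal_order_generator := by
  intro basket max_bundle _
  unfold Spec_order_generator order_generator order_generator_alt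
  rw [PySem.List.pyRange_neg_one_eq_reverse]
  have h01 : (0:Int) + 1 = 1 := by norm_num
  rw [h01, pvFold_eq]
  simp
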